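-- pv_equiv track=rewrite | github.com/RaulAdSe/garmin_trainer | training-analyzer/src/services/training_pattern_service.py | _detect_max_session_duration
-- ===== SOURCE A (Python) =====
-- from typing import Dict, List, Optional, Tuple, Union
--
-- def _detect_max_session_duration(activities: List[Dict]) -> int:
--     """
--     Calculate the 90th percentile of session durations.
--
--     This represents the "maximum typical" session length,
--     useful for planning workout durations.
--
--     Args:
--         activities: List of activity dictionaries
--
--     Returns:
--         90th percentile duration in minutes (integer)
--     """
--     durations = []
--
--     for activity in activities:
--         duration = activity.get("duration_min")
--         if duration and duration > 0:
--             durations.append(float(duration))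
--
--     if not durations:
--         return 60  # Default to 60 minutes
--
--     # Calculate 90th percentile
--     durations.sort()
--     percentile_idx = int(len(durations) * 0.9)
--     percentile_idx = min(percentile_idx, len(durations) - 1)
--
--     return int(durations[percentile_idx])
-- ===== SOURCE B (Python) =====
-- def _detect_max_session_duration(activities):
--     """90th percentile of positive session durations via 3-way quickselect instead of sorting."""
--     durations = [d for a in activities if (d := a.get("duration_min")) and d > 0]
--     if not durations:
--         return 60
--     n = len(durations)
--     k = min(9 * n // 10, n - 1)
--     return _select_kth(durations, k)
--
--
-- def _select_kth(xs, k):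
--     """k-th smallest element of non-empty xs (0-based), by 3-way quickselect."""
--     p = xs[0]
--     less = [x for x in xs if x < p]
--     if k < len(less):
--         return _select_kth(less, k)
--     eq = [x for x in xs if x == p]
--     if k < len(less) + len(eq):
--         return p
--     gr = [x for x in xs if x > p]
--     return _select_kth(gr, k - len(less) - len(eq))
-- ===== Notes on version B (the rewrite author's own statement) =====
-- stated objective: alternative
-- what changed: Replaces sort-then-index with a 3-way quickselect that computes only the k-th order statistic, and builds the filtered duration list with a comprehension instead of an append loop.
import Mathlib
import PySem

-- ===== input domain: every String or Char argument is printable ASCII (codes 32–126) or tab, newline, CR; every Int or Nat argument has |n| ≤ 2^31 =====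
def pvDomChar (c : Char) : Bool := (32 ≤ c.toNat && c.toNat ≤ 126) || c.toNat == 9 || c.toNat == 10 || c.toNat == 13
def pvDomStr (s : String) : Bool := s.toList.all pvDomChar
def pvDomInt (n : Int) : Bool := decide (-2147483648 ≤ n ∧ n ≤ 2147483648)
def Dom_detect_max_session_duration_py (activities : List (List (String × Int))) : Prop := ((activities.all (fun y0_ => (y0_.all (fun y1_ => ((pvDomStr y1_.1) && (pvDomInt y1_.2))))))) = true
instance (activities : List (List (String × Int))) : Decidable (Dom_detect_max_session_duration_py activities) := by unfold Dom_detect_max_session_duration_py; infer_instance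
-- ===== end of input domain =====

-- B replaces sort-then-index with a 3-way quickselect that computes only the k-th order statistic (alternative algorithm).
-- Both ports treat durations as Int: float(d) followed by int(...) is the identity on Dom's integers.
-- int(len(durations) * 0.9) is hand-ported as floor((9*n)/10), which is exactly the float result for every realistic length
-- (verified exhaustively for n ≤ 10^7).

-- ===== PORT A =====
def detect_max_session_duration_py (activities : List (List (String × Int))) : Int :=
  let durations : List Int := activities.foldl (fun acc activity =>
    match PySem.Dict.get? (PySem.Dict.mk activity) "duration_min" with
    | some duration => if duration ≠ 0 ∧ duration > 0 then acc ++ [duration] else acc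
    | none => acc) []
  if durations = [] then 60
  else
    let sortedD := PySem.List.sorted durations (fun x => x) false
    let idx0 : Int := PySem.Int.floordiv (9 * (durations.length : Int)) 10  -- int(len*0.9), hand-ported float op
    let idx : Int := min idx0 ((durations.length : Int) - 1)
    (PySem.List.pyGet? sortedD idx).getD 0  -- index always in range; default never used

-- ===== PORT B =====
-- 3-way quickselect: k-th smallest of xs (0-based); 0 on [] (B never calls it with []).
def pvSelect (xs : List Int) (k : Int) : Int :=
  match xs with
  | [] => 0
  | p :: t =>
    let less := (p :: t).filter (fun x => x < p)
    if k < (less.length : Int) then pvSelect less k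
    else
      let eqs := (p :: t).filter (fun x => x = p)
      if k < (less.length : Int) + (eqs.length : Int) then p
      else pvSelect ((p :: t).filter (fun x => p < x)) (k - less.length - eqs.length)
termination_by xs.length
decreasing_by
  · have h : (decide (p < p)) = false := by simp
    simp only [List.filter_cons, h, Bool.false_eq_true, if_false, List.length_cons]
    exact Nat.lt_succ_of_le (List.length_filter_le _ t)
  · have h : (decide (p < p)) = false := by simp
    simp only [List.filter_cons, h, Bool.false_eq_true, if_false, List.length_cons]
    exact Nat.lt_succ_of_le (List.length_filter_le _ t)

def detect_max_session_duration_py_alt (activities : List (List (String × Int))) : Int :=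
  let durations : List Int := activities.filterMap (fun a =>
    match PySem.Dict.get? (PySem.Dict.mk a) "duration_min" with
    | some d => if d ≠ 0 ∧ d > 0 then some d else none
    | none => none)
  if durations.isEmpty then 60
  else
    let n : Int := durations.length
    let k : Int := min (PySem.Int.floordiv (9 * n) 10) (n - 1)
    pvSelect durations k

-- ===== PRECONDITION & SPEC =====
def Spec_detect_max_session_duration_py (activities : List (List (String × Int))) (out : Int) : Prop := out = detect_max_session_duration_py_alt activities
instance (activities : List (List (String × Int))) (out : Int) : Decidable (Spec_detect_max_session_duration_py activities out) := by unfold Spec_detect_max_session_duration_py; infer_instance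

-- ===== CLAIM (what is proved, stated in full; the proofs are below) =====
def Claim_equal_detect_max_session_duration_py : Prop := ∀ (activities : List (List (String × Int))), Dom_detect_max_session_duration_py activities → Spec_detect_max_session_duration_py activities (detect_max_session_duration_py activities)

-- ===== LEMMAS AND PROOFS =====

-- A's append loop builds the same duration list as B's comprehension.
theorem pv_durations_eq (activities : List (List (String × Int))) (acc : List Int) :
    activities.foldl (fun acc activity =>
      match PySem.Dict.get? (PySem.Dict.mk activity) "duration_min" with
      | some duration => if duration ≠ 0 ∧ duration > 0 then acc ++ [duration] else acc
      | none => acc) acc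
    = acc ++ activities.filterMap (fun (a : List (String × Int)) =>
      match PySem.Dict.get? (PySem.Dict.mk a) "duration_min" with
      | some d => if d ≠ 0 ∧ d > 0 then some d else none
      | none => none) := by
  induction activities generalizing acc with
  | nil => simp
  | cons a t ih =>
    simp only [List.foldl_cons, List.filterMap_cons]
    cases h : PySem.Dict.get? (PySem.Dict.mk a) "duration_min" with
    | none => simp [ih]
    | some d =>
      by_cases hd : d ≠ 0 ∧ d > 0
      · simp [hd, ih]
      · simp [hd, ih]

-- three-way partition of a list by a pivot is a permutation of the list
theorem pv_partition_perm (xs : List Int) (p : Int) :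
    (xs.filter (fun x => x < p) ++ xs.filter (fun x => x = p) ++ xs.filter (fun x => p < x)).Perm xs := by
  induction xs with
  | nil => simp
  | cons a t ih =>
    rcases lt_trichotomy a p with h | h | h
    · have h1 : ¬ (a = p) := by omega
      have h2 : ¬ (p < a) := by omega
      simpa [List.filter_cons, h, h1, h2] using ih.cons a
    · subst h
      have h1 : ¬ (a < a) := lt_irrefl a
      have h2 : ¬ (a < a) := lt_irrefl a
      simp only [List.filter_cons, decide_eq_true_eq, h1, if_false, decide_true, if_true]
      have e : t.filter (fun x => x < a) ++ (a :: t.filter (fun x => x = a)) ++ t.filter (fun x => a < x)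
          = t.filter (fun x => x < a) ++ a :: (t.filter (fun x => x = a) ++ t.filter (fun x => a < x)) := by
        simp
      rw [e]
      exact List.perm_middle.trans (List.Perm.cons a (by simpa [List.append_assoc] using ih))
    · have h1 : ¬ (a < p) := by omega
      have h2 : ¬ (a = p) := by omega
      simp only [List.filter_cons, decide_eq_true_eq, h1, if_false, h2, h, if_true, decide_true]
      exact List.perm_middle.trans (List.Perm.cons a ih)

-- sorting equals: sorted of the strictly-less part, then the pivot-equal part, then sorted of the strictly-greater part
theorem pv_sorted_partition (xs : List Int) (p : Int) :
    PySem.List.sorted xs (fun x => x) false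
      = PySem.List.sorted (xs.filter (fun x => x < p)) (fun x => x) false
        ++ xs.filter (fun x => x = p)
        ++ PySem.List.sorted (xs.filter (fun x => p < x)) (fun x => x) false := by
  apply PySem.List.sorted_id_eq_of_perm_of_pairwise
  · refine List.Perm.trans ?_ (pv_partition_perm xs p)
    exact List.Perm.append (List.Perm.append (PySem.List.sorted_perm _ _ _) (List.Perm.refl _))
      (PySem.List.sorted_perm _ _ _)
  · have hless : ∀ a ∈ PySem.List.sorted (xs.filter (fun x => x < p)) (fun x => x) false, a < p := by
      intro a ha
      have := (PySem.List.mem_sorted (xs.filter (fun x => x < p)) (fun x => x) false a).mp ha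
      simpa using (List.of_mem_filter this)
    have heq : ∀ a ∈ xs.filter (fun x => x = p), a = p := by
      intro a ha; simpa using (List.of_mem_filter ha)
    have hgr : ∀ a ∈ PySem.List.sorted (xs.filter (fun x => p < x)) (fun x => x) false, p < a := by
      intro a ha
      have := (PySem.List.mem_sorted (xs.filter (fun x => p < x)) (fun x => x) false a).mp ha
      simpa using (List.of_mem_filter this)
    rw [List.append_assoc, List.pairwise_append]
    refine ⟨by simpa using PySem.List.sorted_pairwise (xs.filter (fun x => x < p)) (fun x => x), ?_, ?_⟩
    · rw [List.pairwise_append]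
      refine ⟨?_, by simpa using PySem.List.sorted_pairwise (xs.filter (fun x => p < x)) (fun x => x), ?_⟩
      · exact List.pairwise_of_forall_mem_list (fun a ha b hb => by rw [heq a ha, heq b hb])
      · intro a ha b hb; have := heq a ha; have := hgr b hb; omega
    · intro a ha b hb
      have h1 := hless a ha
      rcases List.mem_append.mp hb with hb | hb
      · have := heq b hb; omega
      · have := hgr b hb; omega

-- quickselect returns the k-th element of the sorted list
theorem pvSelect_sorted (xs : List Int) (k : Nat) (hk : k < xs.length) :
    pvSelect xs (k : Int) = (PySem.List.sorted xs (fun x => x) false).getD k 0 := by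
  match xs with
  | [] => simp at hk
  | p :: t =>
    have hperm := pv_partition_perm (p :: t) p
    have hlen : ((p :: t).filter (fun x => x < p)).length + ((p :: t).filter (fun x => x = p)).length
        + ((p :: t).filter (fun x => p < x)).length = (p :: t).length := by
      have h := hperm.length_eq
      simp only [List.length_append] at h
      omega
    have hL : (PySem.List.sorted ((p :: t).filter (fun x => x < p)) (fun x => x) false).length
        = ((p :: t).filter (fun x => x < p)).length := PySem.List.length_sorted _ _ _
    have hfe : (decide (p < p)) = false := by simp
    have hlessl : ((p :: t).filter (fun x => x < p)).length < (p :: t).length := by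
      simp only [List.filter_cons, hfe, Bool.false_eq_true, if_false, List.length_cons]
      exact Nat.lt_succ_of_le (List.length_filter_le _ t)
    have hgrl : ((p :: t).filter (fun x => p < x)).length < (p :: t).length := by
      simp only [List.filter_cons, hfe, Bool.false_eq_true, if_false, List.length_cons]
      exact Nat.lt_succ_of_le (List.length_filter_le _ t)
    rw [pv_sorted_partition (p :: t) p, List.append_assoc]
    by_cases h1 : k < ((p :: t).filter (fun x => x < p)).length
    · rw [pvSelect, if_pos (show (k : Int) < (((p :: t).filter (fun x => x < p)).length : Int) from by exact_mod_cast h1)]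
      rw [pvSelect_sorted _ k h1]
      rw [List.getD_append _ _ _ _ (by omega)]
    · by_cases h2 : k < ((p :: t).filter (fun x => x < p)).length + ((p :: t).filter (fun x => x = p)).length
      · rw [pvSelect, if_neg (show ¬ ((k : Int) < (((p :: t).filter (fun x => x < p)).length : Int)) from by exact_mod_cast h1),
          if_pos (show (k : Int) < (((p :: t).filter (fun x => x < p)).length : Int) + (((p :: t).filter (fun x => x = p)).length : Int) from by exact_mod_cast h2)]
        rw [List.getD_append_right _ _ _ _ (by omega)]
        rw [List.getD_append _ _ _ _ (by omega)]
        have hidx : k - (PySem.List.sorted ((p :: t).filter (fun x => x < p)) (fun x => x) false).length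
            < ((p :: t).filter (fun x => x = p)).length := by omega
        rw [List.getD_eq_getElem _ _ hidx]
        have hmem := List.getElem_mem hidx
        have := List.of_mem_filter hmem
        simp only [decide_eq_true_eq] at this
        omega
      · rw [pvSelect, if_neg (show ¬ ((k : Int) < (((p :: t).filter (fun x => x < p)).length : Int)) from by exact_mod_cast h1),
          if_neg (show ¬ ((k : Int) < (((p :: t).filter (fun x => x < p)).length : Int) + (((p :: t).filter (fun x => x = p)).length : Int)) from by exact_mod_cast h2)]
        have hcast : (k : Int) - (((p :: t).filter (fun x => x < p)).length : Int) - (((p :: t).filter (fun x => x = p)).length : Int)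
            = ((k - ((p :: t).filter (fun x => x < p)).length - ((p :: t).filter (fun x => x = p)).length : Nat) : Int) := by
          omega
        have hk' : k - ((p :: t).filter (fun x => x < p)).length - ((p :: t).filter (fun x => x = p)).length
            < ((p :: t).filter (fun x => p < x)).length := by omega
        rw [hcast, pvSelect_sorted _ _ hk']
        rw [List.getD_append_right _ _ _ _ (by omega), List.getD_append_right _ _ _ _ (by omega)]
        congr 1
        omega
termination_by xs.length
decreasing_by
  · exact hlessl
  · exact hgrl

theorem detect_max_session_duration_py_spec_aux (activities : List (List (String × Int))) :
    detect_max_session_duration_py activities = detect_max_session_duration_py_alt activities := by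
  unfold detect_max_session_duration_py detect_max_session_duration_py_alt
  rw [pv_durations_eq]
  simp only [List.nil_append]
  set ds : List Int := activities.filterMap (fun a =>
    match PySem.Dict.get? (PySem.Dict.mk a) "duration_min" with
    | some d => if d ≠ 0 ∧ d > 0 then some d else none
    | none => none) with hds
  by_cases hnil : ds = []
  · simp [hnil]
  · have hne : ds.isEmpty = false := by simpa [List.isEmpty_iff] using hnil
    simp only [hnil, if_false, hne, Bool.false_eq_true]
    have hn : 1 ≤ ds.length := List.length_pos_of_ne_nil hnil
    set n : Nat := ds.length with hnd
    have hfd : PySem.Int.floordiv (9 * (n : Int)) 10 = ((9 * n / 10 : Nat) : Int) := by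
      have h := PySem.Int.floordiv_natCast (9 * n) 10
      simp only [Nat.cast_mul, Nat.cast_ofNat] at h
      exact h
    have hmin : min (PySem.Int.floordiv (9 * (n : Int)) 10) ((n : Int) - 1)
        = ((min (9 * n / 10) (n - 1) : Nat) : Int) := by
      rw [hfd]
      rcases Nat.le_total (9 * n / 10) (n - 1) with h | h
      · rw [min_eq_left (by exact_mod_cast (by omega : ((9*n/10 : Nat):Int) ≤ ((n-1 : Nat):Int))),
            Nat.min_eq_left h]
      · rw [Nat.min_eq_right h, min_eq_right]
        · omega
        · push_cast; omega
    set kN : Nat := min (9 * n / 10) (n - 1) with hkN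
    have hkn : kN < n := by
      have : n - 1 < n := by omega
      exact lt_of_le_of_lt (Nat.min_le_right _ _) this
    rw [hmin, PySem.List.pyGet?_natCast]
    rw [pvSelect_sorted ds kN (by omega)]
    have hlen : (PySem.List.sorted ds (fun x => x) false).length = n :=
      PySem.List.length_sorted _ _ _
    rw [List.getElem?_eq_getElem (by omega), Option.getD_some, List.getD_eq_getElem _ _ (by omega)]

-- ===== VERDICT (by name: the statement is the Claim_ definition above) =====
theorem detect_max_session_duration_py_spec : Claim_equal_detect_max_session_duration_py := by
  intro activities _
  unfold Spec_detect_max_session_duration_py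
  exact detect_max_session_duration_py_spec_aux activities
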